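-- pv_equiv track=rewrite | github.com/pablodarius/mod02_pyhton_course | Python Exercises/2_question17.py | two_sum_terms
-- ===== SOURCE A (Python) =====
-- def two_sum_terms(number):
--     result = 0
--     for n in range(1, number + 1):
--         sum = ""
--         for i in range(0, n):
--             sum += "2"
--         result += int(sum)
--     return result
-- ===== SOURCE B (Python) =====
-- def two_sum_terms(number):
--     # closed-form geometric sum over the repdigit series, no loop
--     m = number if number > 0 else 0
--     return 2 * ((10 ** (m + 1) - 10) // 9 - m) // 9
-- ===== Notes on version B (the rewrite author's own statement) =====
-- stated objective: faster
-- what changed: replaced the double loop that builds each repdigit string and re-parses it with a closed-form geometric-sum formula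
import Mathlib
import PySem

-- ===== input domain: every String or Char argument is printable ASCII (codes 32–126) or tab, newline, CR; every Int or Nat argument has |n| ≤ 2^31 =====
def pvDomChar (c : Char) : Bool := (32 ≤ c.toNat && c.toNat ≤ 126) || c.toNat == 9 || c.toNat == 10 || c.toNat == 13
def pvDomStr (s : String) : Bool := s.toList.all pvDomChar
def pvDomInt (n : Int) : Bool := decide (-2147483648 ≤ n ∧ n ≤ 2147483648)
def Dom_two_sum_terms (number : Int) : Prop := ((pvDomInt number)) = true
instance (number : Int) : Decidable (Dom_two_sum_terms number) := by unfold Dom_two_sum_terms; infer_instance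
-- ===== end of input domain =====

-- B replaces A's quadratic build-string-and-parse loop by the closed-form geometric sum (objective: faster).

-- ===== PORT A =====
-- literal port of A; int(sum) is PySem.Int.ofStr?; every executed iteration has n ≥ 1,
-- so the parse always succeeds and the `.getD 0` default is never taken
def two_sum_terms (number : Int) : Int :=
  (PySem.List.pyRange 1 (number + 1) 1).foldl
    (fun result n =>
      let sum := (PySem.List.pyRange 0 n 1).foldl (fun s _ => s ++ "2") ""
      result + (PySem.Int.ofStr? sum).getD 0)
    0

-- ===== PORT B =====
-- port of Source B; the exponent m+1 is ≥ 1, so `.toNat` is exact for Python's `**`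
def two_sum_terms_alt (number : Int) : Int :=
  let m : Int := if number > 0 then number else 0
  PySem.Int.floordiv (2 * (PySem.Int.floordiv ((10 : Int) ^ (m + 1).toNat - 10) 9 - m)) 9

-- ===== PRECONDITION & SPEC =====
def Spec_two_sum_terms (number : Int) (out : Int) : Prop := out = two_sum_terms_alt number
instance (number : Int) (out : Int) : Decidable (Spec_two_sum_terms number out) := by unfold Spec_two_sum_terms; infer_instance

-- ===== CLAIM (what is proved, stated in full; the proofs are below) =====
def Claim_equal_two_sum_terms : Prop := ∀ (number : Int), Dom_two_sum_terms number → Spec_two_sum_terms number (two_sum_terms number)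

-- ===== LEMMAS AND PROOFS =====

/-- value of the repdigit `int("2" * m)` -/
def rep2Nat : ℕ → ℕ
  | 0 => 0
  | m + 1 => 10 * rep2Nat m + 2

/-- partial sums 2 + 22 + … + (N twos) -/
def sumRep : ℕ → Int
  | 0 => 0
  | n + 1 => sumRep n + (rep2Nat (n + 1) : Int)

/-- geometric sum 10 + 100 + … + 10^N -/
def tenSum : ℕ → Int
  | 0 => 0
  | n + 1 => tenSum n + 10 ^ (n + 1)

theorem rep2Nat_shift (k : ℕ) : rep2Nat (k + 1) = rep2Nat k + 2 * 10 ^ k := by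
  induction k with
  | zero => simp [rep2Nat]
  | succ j ih =>
    calc rep2Nat (j+1+1) = 10 * rep2Nat (j+1) + 2 := rfl
      _ = 10 * (rep2Nat j + 2 * 10 ^ j) + 2 := by rw [ih]
      _ = (10 * rep2Nat j + 2) + 2 * 10 ^ (j+1) := by ring
      _ = rep2Nat (j+1) + 2 * 10 ^ (j+1) := rfl

/-- the behaviour of PySem's (private) digit-parsing loop, abstracted over the function:
    the hypotheses are discharged by `rfl` against the actual parser -/
theorem goChar (G : List Char → Bool → ℕ → Option ℕ)
    (hnil : ∀ acc, G [] true acc = some acc)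
    (hcons : ∀ ds after acc, G ('2' :: ds) after acc = G ds true (acc * 10 + 2))
    : ∀ m acc, G (List.replicate m '2') true acc = some (acc * 10 ^ m + rep2Nat m) := by
  intro m
  induction m with
  | zero => intro acc; simpa [rep2Nat] using hnil acc
  | succ k ih =>
    intro acc
    rw [List.replicate_succ, hcons, ih, rep2Nat_shift]
    congr 1
    ring

theorem optShape (x : Option ℕ) (r : ℕ) (v : Int) (hx : x = some r) (hv : v = (r : Int)) :
    Option.map (fun n => n) (do let a ← x; pure ((a : ℕ) : Int)) = some v := by
  subst hx hv; rfl

/-- `int("2" * (m+1)) = rep2Nat (m+1)` -/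
theorem parse2 (m : ℕ) :
    PySem.Int.ofChars? (List.replicate (m+1) '2') = some ((rep2Nat (m+1) : ℕ) : Int) := by
  unfold PySem.Int.ofChars?
  have hpre : ((((List.replicate (m+1) '2').dropWhile PySem.Int.isIntSpace).reverse.dropWhile PySem.Int.isIntSpace)).reverse = '2' :: List.replicate m '2' := by
    rw [List.replicate_succ, List.dropWhile_cons_of_neg (by decide), ← List.replicate_succ,
      List.reverse_replicate, List.replicate_succ, List.dropWhile_cons_of_neg (by decide),
      ← List.replicate_succ, List.reverse_replicate, List.replicate_succ]
  rw [hpre]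
  simp only [letFun]
  split
  · next ds heq => simp at heq
  · next ds heq => simp at heq
  · refine optShape _ (rep2Nat (m+1)) _ ?_ rfl
    conv_lhs => whnf
    refine Eq.trans (goChar _ (fun acc => rfl) (fun ds after acc => rfl) m 2) ?_
    rw [rep2Nat_shift]
    congr 1
    ring

/-- the inner loop of A builds the string "2"*k -/
theorem inner_toList (k : ℕ) :
    ((PySem.List.pyRange 0 (k : Int) 1).foldl (fun s _ => s ++ "2") "").toList
      = List.replicate k '2' := by
  induction k with
  | zero => simp [PySem.List.pyRange_one_eq_nil]
  | succ j ih =>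
    rw [show ((j + 1 : ℕ) : Int) = (j : Int) + 1 by push_cast; ring,
      PySem.List.pyRange_one_succ_right (by positivity), List.foldl_append]
    simp only [List.foldl_cons, List.foldl_nil, String.toList_append, ih]
    rw [List.replicate_succ']
    rfl

/-- one term of A's outer loop -/
theorem term_eq (m : ℕ) :
    (PySem.Int.ofStr? ((PySem.List.pyRange 0 ((m + 1 : ℕ) : Int) 1).foldl
        (fun s _ => s ++ "2") "")).getD 0 = ((rep2Nat (m+1) : ℕ) : Int) := by
  unfold PySem.Int.ofStr?
  rw [inner_toList (m+1), parse2 m, Option.getD_some]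

/-- A's outer loop computes the partial sums -/
theorem foldA (N : ℕ) :
    (PySem.List.pyRange 1 ((N : Int) + 1) 1).foldl
      (fun result n =>
        let sum := (PySem.List.pyRange 0 n 1).foldl (fun s _ => s ++ "2") ""
        result + (PySem.Int.ofStr? sum).getD 0) 0 = sumRep N := by
  induction N with
  | zero => simp [PySem.List.pyRange_one_eq_nil, sumRep]
  | succ j ih =>
    rw [show ((j + 1 : ℕ) : Int) + 1 = ((j : Int) + 1) + 1 by push_cast; ring,
      PySem.List.pyRange_one_succ_right (by omega), List.foldl_append, ih]
    simp only [List.foldl_cons, List.foldl_nil]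
    rw [show ((j : Int) + 1) = ((j + 1 : ℕ) : Int) by push_cast; ring, term_eq j]
    rfl

theorem tenSum_eq (N : ℕ) : (10 : Int) ^ (N + 1) - 10 = 9 * tenSum N := by
  induction N with
  | zero => simp [tenSum]
  | succ j ih =>
    rw [show tenSum (j+1) = tenSum j + 10 ^ (j+1) from rfl]
    have : (10 : Int) ^ (j + 1 + 1) = 10 * 10 ^ (j + 1) := by ring
    rw [this]
    omega

theorem rep2Nat_int (m : ℕ) : 9 * ((rep2Nat m : ℕ) : Int) = 2 * (10 ^ m - 1) := by
  induction m with
  | zero => simp [rep2Nat]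
  | succ j ih =>
    rw [show rep2Nat (j+1) = 10 * rep2Nat j + 2 from rfl]
    push_cast
    push_cast at ih
    have : (10 : Int) ^ (j + 1) = 10 * 10 ^ j := by ring
    rw [this]
    omega

theorem sum_closed (N : ℕ) : 2 * (tenSum N - (N : Int)) = 9 * sumRep N := by
  induction N with
  | zero => simp [tenSum, sumRep]
  | succ j ih =>
    rw [show tenSum (j+1) = tenSum j + 10 ^ (j+1) from rfl,
      show sumRep (j+1) = sumRep j + ((rep2Nat (j+1) : ℕ) : Int) from rfl]
    have h2 := rep2Nat_int (j+1)
    push_cast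
    omega

theorem floordiv_nine (x : Int) : PySem.Int.floordiv (9 * x) 9 = x := by
  rw [PySem.Int.floordiv_eq_ediv_of_pos (by norm_num)]
  exact Int.mul_ediv_cancel_left x (by norm_num)

theorem altB (N : ℕ) : two_sum_terms_alt (N : Int) = sumRep N := by
  unfold two_sum_terms_alt
  have hm : (if (N : Int) > 0 then (N : Int) else 0) = (N : Int) := by
    split_ifs with h
    · rfl
    · omega
  simp only [hm]
  rw [show ((N : Int) + 1).toNat = N + 1 by omega, tenSum_eq, floordiv_nine]
  have h := sum_closed N
  rw [show 2 * (tenSum N - (N : Int)) = 9 * sumRep N from h]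
  exact floordiv_nine _

-- ===== VERDICT (by name: the statement is the Claim_ definition above) =====
theorem two_sum_terms_spec : Claim_equal_two_sum_terms := by
  intro number _
  unfold Spec_two_sum_terms
  by_cases h : number ≤ 0
  · have hm : (if number > 0 then number else 0) = 0 := by
      split_ifs with h' <;> omega
    have hA : two_sum_terms number = 0 := by
      unfold two_sum_terms
      rw [PySem.List.pyRange_one_eq_nil (by omega)]
      rfl
    have hB : two_sum_terms_alt number = 0 := by
      unfold two_sum_terms_alt
      simp only [hm]
      decide
    rw [hA, hB]
  · obtain ⟨N, rfl⟩ : ∃ N : ℕ, number = (N : Int) := ⟨number.toNat, by omega⟩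
    rw [altB]
    unfold two_sum_terms
    exact foldA N
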